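-- pv_equiv track=rewrite | github.com/mahditaharb-maker/myfiles | python1/Euler3.py | find_abc_optimized
-- ===== SOURCE A (Python) =====
-- def find_abc_optimized(p):
--     """
--     Faster search using a map from exponent e to one (b,c) pair,
--     for 1 < b, c <= (p-1)//2.
--     """
--     half = (p - 1) // 2
--     exp_map = {}
--
--     # Build exponent-to-(b,c) map
--     for b in range(2, half + 1):
--         for c in range(2, half + 1):
--             e = (b * c) % (p - 1)
--             # Store first pair that produces exponent e
--             if e not in exp_map:
--                 exp_map[e] = (b, c)
--
--     # Test each a against every unique exponent
--     for a in range(2, half + 1):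
--         for e, (b, c) in exp_map.items():
--             if pow(a, e, p) == p - 1:
--                 return a, b, c
--     return None
-- ===== SOURCE B (Python) =====
-- def find_abc_optimized(p):
--     """Different algorithm: build the set of reachable residues (b*c) % (p-1) once;
--     for each a, build the set of exponents e with a^e % p == p-1 by incremental
--     multiplication (no pow calls); only for an `a` whose good set meets the
--     reachable set is the (b, c) pair scan run, and it is run exactly once."""
--     half = (p - 1) // 2
--     n = p - 1
--     reach = set()
--     for b in range(2, half + 1):
--         for c in range(2, half + 1):
--             reach.add((b * c) % n)
--     for a in range(2, half + 1):
--         good = set()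
--         cur = 1 % p
--         for e in range(n):
--             if cur == p - 1:
--                 good.add(e)
--             cur = cur * a % p
--         if good & reach:
--             for b in range(2, half + 1):
--                 for c in range(2, half + 1):
--                     if (b * c) % n in good:
--                         return (a, b, c)
--     return None
-- ===== Notes on version B (the rewrite author's own statement) =====
-- stated objective: alternative
-- what changed: Replaced A's exponent-to-(b,c) dict plus pow-per-unique-exponent scan by a reachable-residue set built once, per-a good-exponent sets built by incremental modular multiplication (no pow calls), and a single (b,c) pair scan run only for the winning a; the returned triple is identical.
import Mathlib
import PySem

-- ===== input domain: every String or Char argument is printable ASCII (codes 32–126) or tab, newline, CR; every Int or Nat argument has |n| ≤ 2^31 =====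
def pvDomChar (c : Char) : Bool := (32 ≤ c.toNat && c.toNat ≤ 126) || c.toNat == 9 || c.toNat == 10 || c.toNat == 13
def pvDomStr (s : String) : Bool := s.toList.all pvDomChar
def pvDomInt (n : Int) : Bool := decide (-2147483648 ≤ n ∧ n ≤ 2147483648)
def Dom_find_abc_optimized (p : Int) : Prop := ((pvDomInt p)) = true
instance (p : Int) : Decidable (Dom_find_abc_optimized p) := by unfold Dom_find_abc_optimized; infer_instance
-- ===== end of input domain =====

-- B replaces A's exponent-to-(b,c) dict + pow-per-exponent scan by a reachable-residue
-- set, per-a good-exponent sets built by incremental multiplication, and a single final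
-- (b, c) scan; same returned triple.

-- ===== PORT A =====
-- the exponent e = (b * c) % (p - 1) A tests
def pvExp (p b c : Int) : Int := PySem.Int.mod (b * c) (p - 1)

-- 'for b …: for c …: if e not in exp_map: exp_map[e] = (b, c)'
def pvBuildMap (p half : Int) : PySem.Dict Int (Int × Int) :=
  (PySem.List.pyRange 2 (half + 1) 1).foldl (fun d b =>
    (PySem.List.pyRange 2 (half + 1) 1).foldl (fun d c =>
      if d.contains (pvExp p b c) then d else d.insert (pvExp p b c) (b, c)) d)
    PySem.Dict.empty

-- 'for a …: for e, (b, c) in exp_map.items(): if pow(a, e, p) == p - 1: return a, b, c'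
def pvSearchA (p : Int) (items : List (Int × Int × Int)) : List Int → Option (Int × Int × Int)
  | [] => none
  | a :: rest =>
    match items.find? (fun ei => PySem.Int.powMod a ei.1.toNat p == p - 1) with
    | some (_, b, c) => some (a, b, c)
    | none => pvSearchA p items rest

def find_abc_optimized (p : Int) : Option (Int × Int × Int) :=
  let half := PySem.Int.floordiv (p - 1) 2
  pvSearchA p (pvBuildMap p half).items (PySem.List.pyRange 2 (half + 1) 1)

-- ===== PORT B =====
-- 'reach = set(); for b …: for c …: reach.add((b*c) % n)'
def pvReachB (p half : Int) : PySem.Set Int :=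
  (PySem.List.pyRange 2 (half + 1) 1).foldl (fun s b =>
    (PySem.List.pyRange 2 (half + 1) 1).foldl (fun s c =>
      PySem.Set.add s (PySem.Int.mod (b * c) (p - 1))) s)
    PySem.Set.empty

-- 'good = set(); cur = 1 % p; for e in range(n): if cur == p-1: good.add(e); cur = cur*a % p'
def pvGoodB (p a : Int) : PySem.Set Int :=
  ((PySem.List.pyRange 0 (p - 1) 1).foldl
    (fun gc e => (if gc.2 == p - 1 then PySem.Set.add gc.1 e else gc.1,
                  PySem.Int.mod (gc.2 * a) p))
    (PySem.Set.empty, PySem.Int.mod 1 p)).1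

-- innermost 'for c …: if (b*c) % n in good: return (a, b, c)'
def pvScanC (p a b : Int) (good : PySem.Set Int) : List Int → Option (Int × Int × Int)
  | [] => none
  | c :: rest =>
    if good.contains (PySem.Int.mod (b * c) (p - 1)) then some (a, b, c)
    else pvScanC p a b good rest

def pvScanB (p a : Int) (good : PySem.Set Int) (cs : List Int) : List Int → Option (Int × Int × Int)
  | [] => none
  | b :: rest =>
    match pvScanC p a b good cs with
    | some r => some r
    | none => pvScanB p a good cs rest

-- 'for a …: good = …; if good & reach: <double scan>'
def pvAltLoop (p : Int) (reach : PySem.Set Int) (rng : List Int) : List Int → Option (Int × Int × Int)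
  | [] => none
  | a :: rest =>
    let good := pvGoodB p a
    if (PySem.Set.inter good reach).isEmpty then pvAltLoop p reach rng rest
    else pvScanB p a good rng rng

def find_abc_optimized_alt (p : Int) : Option (Int × Int × Int) :=
  let half := PySem.Int.floordiv (p - 1) 2
  let rng := PySem.List.pyRange 2 (half + 1) 1
  pvAltLoop p (pvReachB p half) rng rng

-- ===== PRECONDITION & SPEC =====
def Spec_find_abc_optimized (p : Int) (out : Option (Int × Int × Int)) : Prop := out = find_abc_optimized_alt p
instance (p : Int) (out : Option (Int × Int × Int)) : Decidable (Spec_find_abc_optimized p out) := by unfold Spec_find_abc_optimized; infer_instance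

-- ===== CLAIM (what is proved, stated in full; the proofs are below) =====
def Claim_equal_find_abc_optimized : Prop := ∀ (p : Int), Dom_find_abc_optimized p → Spec_find_abc_optimized p (find_abc_optimized p)

-- ===== LEMMAS AND PROOFS =====

-- keep the first occurrence of each key (what A's insert-if-absent loop builds)
def pvDedupKeys : List (Int × (Int × Int)) → List (Int × (Int × Int))
  | [] => []
  | x :: l => x :: pvDedupKeys (l.filter (fun y => !(y.1 == x.1)))
termination_by l => l.length
decreasing_by
  exact Nat.lt_succ_of_le (by simpa using List.length_filter_le _ l.attach)

theorem pvDedupKeys_nil : pvDedupKeys [] = [] := by rw [pvDedupKeys]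

theorem pvDedupKeys_cons (x : Int × (Int × Int)) (l : List (Int × (Int × Int))) :
    pvDedupKeys (x :: l) = x :: pvDedupKeys (l.filter (fun y => !(y.1 == x.1))) := by
  rw [pvDedupKeys]

-- dropping elements that fail the predicate anyway does not change find?
theorem pvFind?_filter {α : Type} (l : List α) (P Q : α → Bool)
    (h : ∀ y ∈ l, P y = true → Q y = true) :
    (l.filter Q).find? P = l.find? P := by
  induction l with
  | nil => rfl
  | cons x l ih =>
    by_cases hx : P x = true
    · have hq := h x (by simp) hx
      simp [hq, List.find?, hx]
    · simp only [Bool.not_eq_true] at hx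
      have ih' := ih (fun y hy => h y (by simp [hy]))
      rcases hq : Q x with _ | _ <;> simp_all [List.find?]

-- a key-determined find? sees through first-occurrence dedup
theorem pvFind?_dedupKeys (P : Int × (Int × Int) → Bool)
    (hP : ∀ kv kv' : Int × (Int × Int), kv.1 = kv'.1 → P kv = P kv') :
    ∀ L : List (Int × (Int × Int)), (pvDedupKeys L).find? P = L.find? P
  | [] => by rw [pvDedupKeys_nil]
  | x :: l => by
    rw [pvDedupKeys_cons]
    by_cases hx : P x = true
    · simp [List.find?, hx]
    · simp only [Bool.not_eq_true] at hx
      have hrec := pvFind?_dedupKeys P hP (l.filter (fun y => !(y.1 == x.1)))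
      have hfl : (l.filter (fun y => !(y.1 == x.1))).find? P = l.find? P := by
        apply pvFind?_filter
        intro y _ hy
        simp only [Bool.not_eq_eq_eq_not, Bool.not_true, beq_eq_false_iff_ne, ne_eq]
        intro hk
        rw [hP y x hk] at hy
        simp [hy] at hx
      simp only [List.find?, hx, hrec, hfl]
termination_by L => L.length
decreasing_by
  exact Nat.lt_succ_of_le (List.length_filter_le _ l)

-- A's insert-if-absent fold, from any dict: items = old items ++ dedup of the fresh part
theorem pvItems_foldl_step (L : List (Int × (Int × Int))) (d : PySem.Dict Int (Int × Int)) :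
    (L.foldl (fun d kv => if d.contains kv.1 then d else d.insert kv.1 kv.2) d).items
      = d.items ++ pvDedupKeys (L.filter (fun kv => !(d.contains kv.1))) := by
  induction L generalizing d with
  | nil => simp [pvDedupKeys_nil]
  | cons x l ih =>
    by_cases hc : d.contains x.1 = true
    · simp only [List.foldl_cons, hc, if_true, List.filter_cons, Bool.not_true]
      simpa using ih d
    · simp only [Bool.not_eq_true] at hc
      simp only [List.foldl_cons, hc, Bool.false_eq_true, if_false, List.filter_cons,
        Bool.not_false, if_true]
      rw [ih, PySem.Dict.items_insert_of_not_contains d x.2 hc, pvDedupKeys_cons]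
      simp only [List.append_assoc, List.singleton_append]
      congr 2
      rw [List.filter_filter]
      congr 1
      apply List.filter_congr
      intro y _
      rw [PySem.Dict.contains_insert d x.1 y.1 x.2]
      cases h1 : (y.1 == x.1) <;> cases h2 : d.contains y.1 <;> simp

-- the (e, (b, c)) stream A feeds its dict, in A's loop order
def pvStream (p : Int) (rng : List Int) : List (Int × (Int × Int)) :=
  rng.flatMap (fun b => rng.map (fun c => (pvExp p b c, (b, c))))

theorem pvBuildMap_items (p half : Int) :
    (pvBuildMap p half).items
      = pvDedupKeys (pvStream p (PySem.List.pyRange 2 (half + 1) 1)) := by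
  have hfold : (pvStream p (PySem.List.pyRange 2 (half + 1) 1)).foldl
      (fun d kv => if d.contains kv.1 then d else d.insert kv.1 kv.2) PySem.Dict.empty
      = pvBuildMap p half := by
    rw [pvStream, List.foldl_flatMap]
    simp only [List.foldl_map]
    rfl
  rw [← hfold, pvItems_foldl_step]
  simp [PySem.Dict.empty, pvStream]

-- reach is the set of residues pvExp takes on the pair grid
theorem pvMem_reach (p half e : Int) :
    e ∈ pvReachB p half
      ↔ ∃ b ∈ PySem.List.pyRange 2 (half + 1) 1, ∃ c ∈ PySem.List.pyRange 2 (half + 1) 1,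
          e = pvExp p b c := by
  have hfold : pvReachB p half
      = ((PySem.List.pyRange 2 (half + 1) 1).flatMap
          (fun b => (PySem.List.pyRange 2 (half + 1) 1).map (fun c => (b, c)))).foldl
          (fun s bc => PySem.Set.add s (pvExp p bc.1 bc.2)) PySem.Set.empty := by
    rw [List.foldl_flatMap]
    simp only [List.foldl_map]
    rfl
  rw [hfold, PySem.Set.mem_foldl_add]
  simp only [PySem.Set.empty, List.not_mem_nil, false_or, List.mem_flatMap, List.mem_map]
  constructor
  · rintro ⟨bc, ⟨b, hb, c, hc, rfl⟩, rfl⟩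
    exact ⟨b, hb, c, hc, rfl⟩
  · rintro ⟨b, hb, c, hc, rfl⟩
    exact ⟨(b, c), ⟨b, hb, c, hc, rfl⟩, rfl⟩

-- the incremental-power loop: invariant linking cur to a^k % p
theorem pvGood_inv (p a : Int) (hp : 0 < p) (y : Int) :
    ∀ (m k : Nat) (g : PySem.Set Int),
    y ∈ (((List.range m).map (fun j => ((k + j : Nat) : Int))).foldl
        (fun gc e => (if gc.2 == p - 1 then PySem.Set.add gc.1 e else gc.1,
                      PySem.Int.mod (gc.2 * a) p))
        (g, PySem.Int.mod (a ^ k) p)).1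
      ↔ y ∈ g ∨ ∃ j : Nat, j < m ∧ y = ((k + j : Nat) : Int)
              ∧ PySem.Int.mod (a ^ (k + j)) p = p - 1 := by
  intro m
  induction m with
  | zero => simp
  | succ m ih =>
    intro k g
    rw [List.range_succ_eq_map]
    simp only [List.map_cons, List.map_map, List.foldl_cons, Nat.add_zero]
    have hstep : PySem.Int.mod (PySem.Int.mod (a ^ k) p * a) p
        = PySem.Int.mod (a ^ (k + 1)) p := by
      rw [PySem.Int.mod_eq_emod_of_pos hp, PySem.Int.mod_eq_emod_of_pos hp,
        PySem.Int.mod_eq_emod_of_pos hp, Int.mul_emod, Int.emod_emod_of_dvd _ dvd_rfl,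
        ← Int.mul_emod, pow_succ]
    have hmapeq : ((List.range m).map ((fun j => ((k + j : Nat) : Int)) ∘ (fun i => i + 1)))
        = (List.range m).map (fun j => (((k + 1) + j : Nat) : Int)) := by
      apply List.map_congr_left
      intro j _
      simp only [Function.comp_apply]
      push_cast
      ring_nf
    rw [hstep, hmapeq]
    by_cases hcur : (PySem.Int.mod (a ^ k) p == p - 1) = true
    · simp only [hcur, if_true]
      rw [ih (k + 1) (PySem.Set.add g ((k : Nat) : Int)), PySem.Set.mem_add]
      simp only [beq_iff_eq] at hcur
      constructor
      · rintro ((hy | rfl) | ⟨j, hj, rfl, hpow⟩)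
        · exact Or.inl hy
        · exact Or.inr ⟨0, by omega, by push_cast; ring_nf, by simpa using hcur⟩
        · exact Or.inr ⟨j + 1, by omega, by push_cast; ring_nf, by
            have : k + 1 + j = k + (j + 1) := by omega
            rwa [this] at hpow⟩
      · rintro (hy | ⟨j, hj, rfl, hpow⟩)
        · exact Or.inl (Or.inl hy)
        · rcases Nat.eq_zero_or_pos j with rfl | hj0
          · exact Or.inl (Or.inr (by push_cast; ring_nf))
          · refine Or.inr ⟨j - 1, by omega, by push_cast; omega, ?_⟩
            have : k + 1 + (j - 1) = k + j := by omega
            rwa [this]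
    · simp only [hcur, if_false, Bool.false_eq_true, ih (k + 1) g]
      simp only [beq_iff_eq] at hcur
      constructor
      · rintro (hy | ⟨j, hj, rfl, hpow⟩)
        · exact Or.inl hy
        · exact Or.inr ⟨j + 1, by omega, by push_cast; ring_nf, by
            have : k + 1 + j = k + (j + 1) := by omega
            rwa [this] at hpow⟩
      · rintro (hy | ⟨j, hj, rfl, hpow⟩)
        · exact Or.inl hy
        · rcases Nat.eq_zero_or_pos j with rfl | hj0
          · exact absurd (by simpa using hpow) hcur
          · refine Or.inr ⟨j - 1, by omega, by push_cast; omega, ?_⟩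
            have : k + 1 + (j - 1) = k + j := by omega
            rwa [this]

-- membership in the good set ↔ the pow test A runs
theorem pvMem_good (p a y : Int) (hp : 0 < p) :
    y ∈ pvGoodB p a
      ↔ ∃ j : Nat, j < (p - 1).toNat ∧ y = (j : Int)
          ∧ PySem.Int.mod (a ^ j) p = p - 1 := by
  have h0 : PySem.Int.mod 1 p = PySem.Int.mod (a ^ 0) p := by norm_num
  have hr : PySem.List.pyRange 0 (p - 1) 1
      = (List.range (p - 1).toNat).map (fun j => ((0 + j : Nat) : Int)) := by
    rw [PySem.List.pyRange_one]
    simp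
  rw [pvGoodB, h0, hr, pvGood_inv p a hp y (p - 1).toNat 0 PySem.Set.empty]
  simp [PySem.Set.empty]

theorem pvGood_contains (p a b c : Int) (hn : 0 < p - 1) :
    (pvGoodB p a).contains (pvExp p b c)
      = (PySem.Int.powMod a (pvExp p b c).toNat p == p - 1) := by
  have hp : 0 < p := by omega
  have hnn : 0 ≤ pvExp p b c := PySem.Int.mod_nonneg _ hn
  have hlt : pvExp p b c < p - 1 := PySem.Int.mod_lt _ hn
  rcases hb : (PySem.Int.powMod a (pvExp p b c).toNat p == p - 1) with _ | _
  · simp only [beq_eq_false_iff_ne, ne_eq, PySem.Int.powMod] at hb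
    rw [Bool.eq_false_iff]
    intro hcon
    rw [PySem.Set.contains_iff, pvMem_good p a _ hp] at hcon
    obtain ⟨j, hj, hyj, hpow⟩ := hcon
    have : (pvExp p b c).toNat = j := by omega
    exact hb (this ▸ hpow)
  · simp only [beq_iff_eq, PySem.Int.powMod] at hb
    rw [PySem.Set.contains_iff, pvMem_good p a _ hp]
    exact ⟨(pvExp p b c).toNat, by omega, by omega, hb⟩

-- B's inner c-scan is a find? over cs
theorem pvScanC_eq (p a b : Int) (hn : 0 < p - 1) (cs : List Int) :
    pvScanC p a b (pvGoodB p a) cs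
      = (cs.find? (fun c => PySem.Int.powMod a (pvExp p b c).toNat p == p - 1)).map
          (fun c => (a, b, c)) := by
  induction cs with
  | nil => rfl
  | cons c rest ih =>
    rw [pvScanC]
    rw [show (PySem.Int.mod (b * c) (p - 1)) = pvExp p b c from rfl,
      pvGood_contains p a b c hn]
    by_cases h : (PySem.Int.powMod a (pvExp p b c).toNat p == p - 1) = true
    · simp [List.find?, h]
    · simp only [Bool.not_eq_true] at h
      simp [List.find?, h, ih]

-- B's b/c double scan is a find? over the (e, (b, c)) stream
theorem pvScanB_eq (p a : Int) (hn : 0 < p - 1) (cs bs : List Int) :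
    pvScanB p a (pvGoodB p a) cs bs
      = ((bs.flatMap (fun b => cs.map (fun c => (pvExp p b c, (b, c))))).find?
          (fun kv => PySem.Int.powMod a kv.1.toNat p == p - 1)).map
          (fun kv => (a, kv.2.1, kv.2.2)) := by
  induction bs with
  | nil => rfl
  | cons b rest ih =>
    simp only [pvScanB, List.flatMap_cons, List.find?_append, List.find?_map,
      Function.comp_def, pvScanC_eq p a b hn, ih]
    cases hf : (cs.find? fun c => PySem.Int.powMod a (pvExp p b c).toNat p == p - 1) with
    | none => simp
    | some c => simp

-- when good ∩ reach is empty the pair scan would find nothing anyway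
theorem pvScan_none_of_inter_empty (p half a : Int) (hn : 0 < p - 1)
    (h : (PySem.Set.inter (pvGoodB p a) (pvReachB p half)).isEmpty = true) :
    pvScanB p a (pvGoodB p a) (PySem.List.pyRange 2 (half + 1) 1)
      (PySem.List.pyRange 2 (half + 1) 1) = none := by
  have hp : 0 < p := by omega
  rw [pvScanB_eq p a hn]
  rw [Option.map_eq_none_iff, List.find?_eq_none]
  rintro ⟨e, b, c⟩ hmem
  simp only [List.mem_flatMap, List.mem_map] at hmem
  obtain ⟨b', hb', c', hc', heq⟩ := hmem
  obtain ⟨rfl, rfl, rfl⟩ : pvExp p b' c' = e ∧ b' = b ∧ c' = c := by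
    simpa using heq
  simp only [beq_eq_false_iff_ne, ne_eq, Bool.not_eq_true]
  intro hpow
  have hgood : pvExp p b' c' ∈ pvGoodB p a := by
    rw [pvMem_good p a _ hp]
    refine ⟨(pvExp p b' c').toNat, ?_, ?_, ?_⟩
    · have := PySem.Int.mod_lt (b' * c') hn
      have := PySem.Int.mod_nonneg (b' * c') hn
      unfold pvExp; omega
    · have := PySem.Int.mod_nonneg (b' * c') hn
      unfold pvExp; omega
    · simpa [PySem.Int.powMod] using hpow
  have hreach : pvExp p b' c' ∈ pvReachB p half := by
    rw [pvMem_reach]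
    exact ⟨b', hb', c', hc', rfl⟩
  have : pvExp p b' c' ∈ PySem.Set.inter (pvGoodB p a) (pvReachB p half) := by
    rw [PySem.Set.mem_inter]
    exact ⟨hgood, hreach⟩
  rw [List.isEmpty_iff] at h
  simp [h] at this

-- A's per-a scan of the dict items equals B's per-a branch-and-scan
theorem pvPerA_eq (p a half : Int) (hn : 0 < p - 1) :
    (match (pvBuildMap p half).items.find?
        (fun ei => PySem.Int.powMod a ei.1.toNat p == p - 1) with
     | some (_, b, c) => some (a, b, c)
     | none => none)
      = pvScanB p a (pvGoodB p a) (PySem.List.pyRange 2 (half + 1) 1)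
          (PySem.List.pyRange 2 (half + 1) 1) := by
  rw [pvBuildMap_items,
    pvFind?_dedupKeys (fun ei => PySem.Int.powMod a ei.1.toNat p == p - 1)
      (fun kv kv' h => by simp only [h]) (pvStream p (PySem.List.pyRange 2 (half + 1) 1)),
    pvScanB_eq p a hn]
  unfold pvStream
  cases hf : ((PySem.List.pyRange 2 (half + 1) 1).flatMap
      (fun b => (PySem.List.pyRange 2 (half + 1) 1).map (fun c => (pvExp p b c, (b, c))))).find?
      (fun kv => PySem.Int.powMod a kv.1.toNat p == p - 1) with
  | none => simp
  | some kv => simp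

-- when good ∩ reach is nonempty the pair scan does find a triple
theorem pvScan_some_of_inter_nonempty (p half a : Int) (hn : 0 < p - 1)
    (h : (PySem.Set.inter (pvGoodB p a) (pvReachB p half)).isEmpty = false) :
    ∃ r, pvScanB p a (pvGoodB p a) (PySem.List.pyRange 2 (half + 1) 1)
      (PySem.List.pyRange 2 (half + 1) 1) = some r := by
  have hp : 0 < p := by omega
  rw [pvScanB_eq p a hn]
  rw [List.isEmpty_eq_false_iff_exists_mem] at h
  obtain ⟨e, he⟩ := h
  rw [PySem.Set.mem_inter] at he
  obtain ⟨hg, hr⟩ := he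
  rw [pvMem_reach] at hr
  obtain ⟨b, hb, c, hc, rfl⟩ := hr
  have hfind : (((PySem.List.pyRange 2 (half + 1) 1).flatMap
      (fun b => (PySem.List.pyRange 2 (half + 1) 1).map (fun c => (pvExp p b c, (b, c))))).find?
      (fun kv => PySem.Int.powMod a kv.1.toNat p == p - 1)).isSome = true := by
    rw [List.find?_isSome]
    refine ⟨(pvExp p b c, (b, c)), ?_, ?_⟩
    · simp only [List.mem_flatMap, List.mem_map]
      exact ⟨b, hb, c, hc, rfl⟩
    · rw [pvMem_good p a _ hp] at hg
      obtain ⟨j, hj, hyj, hpow⟩ := hg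
      have : (pvExp p b c).toNat = j := by omega
      simp only [beq_iff_eq, PySem.Int.powMod, this]
      exact hpow
  rw [Option.isSome_iff_exists] at hfind
  obtain ⟨kv, hkv⟩ := hfind
  exact ⟨(a, kv.2.1, kv.2.2), by rw [hkv]; rfl⟩

theorem pvSearch_eq (p half : Int) (hn : 0 < p - 1) (as : List Int) :
    pvSearchA p (pvBuildMap p half).items as
      = pvAltLoop p (pvReachB p half) (PySem.List.pyRange 2 (half + 1) 1) as := by
  induction as with
  | nil => rfl
  | cons a rest ih =>
    have h := pvPerA_eq p a half hn
    rw [pvSearchA, pvAltLoop]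
    by_cases hie : (PySem.Set.inter (pvGoodB p a) (pvReachB p half)).isEmpty = true
    · have hnone := pvScan_none_of_inter_empty p half a hn hie
      rw [hnone] at h
      simp only [hie, if_true]
      cases hf : (pvBuildMap p half).items.find?
          (fun ei => PySem.Int.powMod a ei.1.toNat p == p - 1) with
      | none => simpa using ih
      | some kv =>
        obtain ⟨e, b, c⟩ := kv
        rw [hf] at h
        simp at h
    · simp only [Bool.not_eq_true] at hie
      simp only [hie, Bool.false_eq_true, if_false]
      obtain ⟨r, hr⟩ := pvScan_some_of_inter_nonempty p half a hn hie
      rw [hr] at h ⊢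
      cases hf : (pvBuildMap p half).items.find?
          (fun ei => PySem.Int.powMod a ei.1.toNat p == p - 1) with
      | none => rw [hf] at h; simp at h
      | some kv =>
        obtain ⟨e, b, c⟩ := kv
        rw [hf] at h
        simpa using h

-- ===== VERDICT (by name: the statement is the Claim_ definition above) =====
theorem find_abc_optimized_spec : Claim_equal_find_abc_optimized := by
  intro p _
  simp only [Spec_find_abc_optimized, find_abc_optimized, find_abc_optimized_alt]
  by_cases hh : (2 : Int) < PySem.Int.floordiv (p - 1) 2 + 1
  · have h2 : (2 : Int) ≤ PySem.Int.floordiv (p - 1) 2 := by omega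
    rw [PySem.Int.le_floordiv_iff_mul_le (by norm_num)] at h2
    exact pvSearch_eq p _ (by omega) _
  · rw [PySem.List.pyRange_one_eq_nil (by omega)]
    rfl
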